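-- pv_equiv track=rewrite | github.com/yeastgenome/SGDBackend-Nex2 | scripts/loading/variant/__init__.py | calculate_block_data
-- ===== SOURCE A (Python) =====
-- def calculate_block_data(aligned_dna_seq, introns):
--
--     seq = aligned_dna_seq.replace('-', '')
--     length = len(seq)
--     # example introns = []
--     # example introns = [{ 'start': 11, 'end': 319 }]
--     # example introns = [{ 'start': 11, 'end': 319 }, { 'start': 521, 'end': 560 }]
--     block_starts = [0]
--     block_sizes = []
--     prevEnd = 1
--     for intron in introns:
--         block_starts.append(intron['end'])
--         block_size = intron['start'] - prevEnd
--         prevEnd = intron['end']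
--         block_sizes.append(block_size)
--     block_sizes.append(length - prevEnd)
--
--     return (block_starts, block_sizes)
-- ===== SOURCE B (Python) =====
-- def calculate_block_data(aligned_dna_seq, introns):
--     length = len(aligned_dna_seq.replace('-', ''))
--
--     def go(rest, prev_end):
--         # recursion on the intron list: compute the tail's blocks first,
--         # then prepend this intron's boundary and this exon's size
--         if not rest:
--             return [], [length - prev_end]
--         intron = rest[0]
--         starts, sizes = go(rest[1:], intron['end'])
--         return [intron['end']] + starts, [intron['start'] - prev_end] + sizes
--
--     starts, sizes = go(introns, 1)
--     return ([0] + starts, sizes)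
-- ===== Notes on version B (the rewrite author's own statement) =====
-- stated objective: alternative
-- what changed: Replaces A's forward loop with a mutable prevEnd accumulator and repeated list appends by structural recursion over the introns that builds both result lists back-to-front (tail computed first, elements prepended), passing the previous end as a parameter.
import Mathlib
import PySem

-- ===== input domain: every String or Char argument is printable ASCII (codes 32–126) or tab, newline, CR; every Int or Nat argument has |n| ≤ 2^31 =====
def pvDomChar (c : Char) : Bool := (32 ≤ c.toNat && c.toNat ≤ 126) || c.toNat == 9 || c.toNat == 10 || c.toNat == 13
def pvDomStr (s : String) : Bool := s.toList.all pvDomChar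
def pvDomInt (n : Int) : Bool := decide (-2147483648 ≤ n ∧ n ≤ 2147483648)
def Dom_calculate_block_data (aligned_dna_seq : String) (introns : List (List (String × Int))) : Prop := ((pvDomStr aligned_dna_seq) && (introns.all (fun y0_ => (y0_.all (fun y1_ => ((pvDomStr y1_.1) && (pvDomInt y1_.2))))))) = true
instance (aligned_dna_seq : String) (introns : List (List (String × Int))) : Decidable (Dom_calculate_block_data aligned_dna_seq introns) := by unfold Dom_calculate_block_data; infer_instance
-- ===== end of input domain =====

-- B replaces A's forward loop with prevEnd accumulator by structural recursion building both lists back-to-front; same cost.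

-- first-match lookup intron['k'] (Pre_ guarantees the key is present, so the getD default is never reached)
def pvLookup (intron : List (String × Int)) (k : String) : Int :=
  ((PySem.Dict.mk intron).get? k).getD 0

-- ===== PORT A =====
def calculate_block_data (aligned_dna_seq : String) (introns : List (List (String × Int))) : List Int × List Int :=
  let seq := PySem.Str.replace aligned_dna_seq "-" ""
  let length := PySem.Str.len seq
  let st := introns.foldl
    (fun (s : List Int × List Int × Int) intron =>
      let block_starts := s.1 ++ [pvLookup intron "end"]
      let block_size := pvLookup intron "start" - s.2.2
      let prevEnd := pvLookup intron "end"
      (block_starts, s.2.1 ++ [block_size], prevEnd))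
    ([0], [], 1)
  (st.1, st.2.1 ++ [length - st.2.2])

-- ===== PORT B =====
-- B's recursive helper go(rest, prev_end): tail first, prepend this intron's boundary/size
def cbdGo (length : Int) : List (List (String × Int)) → Int → List Int × List Int
  | [], prevEnd => ([], [length - prevEnd])
  | intron :: tail, prevEnd =>
    let r := cbdGo length tail (pvLookup intron "end")
    (pvLookup intron "end" :: r.1, (pvLookup intron "start" - prevEnd) :: r.2)

def calculate_block_data_alt (aligned_dna_seq : String) (introns : List (List (String × Int))) : List Int × List Int :=
  let length := PySem.Str.len (PySem.Str.replace aligned_dna_seq "-" "")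
  let r := cbdGo length introns 1
  (0 :: r.1, r.2)

-- ===== PRECONDITION & SPEC =====
-- Pre_ excludes exactly the introns lacking a 'start' or 'end' key, on which Python A raises KeyError.
def Pre_calculate_block_data (_aligned_dna_seq : String) (introns : List (List (String × Int))) : Prop :=
  (introns.all (fun intron => (PySem.Dict.mk intron).contains "start" && (PySem.Dict.mk intron).contains "end")) = true
instance (aligned_dna_seq : String) (introns : List (List (String × Int))) : Decidable (Pre_calculate_block_data aligned_dna_seq introns) := by unfold Pre_calculate_block_data; infer_instance
def pvWitness_calculate_block_data : String × (List (List (String × Int))) :=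
  ("AC-GT", [[("start", 11), ("end", 319)]])

def Spec_calculate_block_data (aligned_dna_seq : String) (introns : List (List (String × Int))) (out : List Int × List Int) : Prop := out = calculate_block_data_alt aligned_dna_seq introns
instance (aligned_dna_seq : String) (introns : List (List (String × Int))) (out : List Int × List Int) : Decidable (Spec_calculate_block_data aligned_dna_seq introns out) := by unfold Spec_calculate_block_data; infer_instance

-- ===== CLAIM (what is proved, stated in full; the proofs are below) =====
def Claim_equal_calculate_block_data : Prop := ∀ (aligned_dna_seq : String) (introns : List (List (String × Int))), Dom_calculate_block_data aligned_dna_seq introns → Pre_calculate_block_data aligned_dna_seq introns → Spec_calculate_block_data aligned_dna_seq introns (calculate_block_data aligned_dna_seq introns)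

-- ===== LEMMAS AND PROOFS =====

-- A's loop, characterised: starts/sizes accumulate the mapped keys, the last prevEnd is getLastD
theorem cbd_fold_spec (l : List (List (String × Int))) (s0 s1 : List Int) (p : Int) :
    l.foldl
      (fun (s : List Int × List Int × Int) intron =>
        (s.1 ++ [pvLookup intron "end"],
         s.2.1 ++ [pvLookup intron "start" - s.2.2],
         pvLookup intron "end"))
      (s0, s1, p)
    = (s0 ++ l.map (fun i => pvLookup i "end"),
       s1 ++ List.zipWith (fun s e => s - e) (l.map (fun i => pvLookup i "start"))
               (p :: l.map (fun i => pvLookup i "end")),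
       (l.map (fun i => pvLookup i "end")).getLastD p) := by
  induction l generalizing s0 s1 p with
  | nil => simp
  | cons i t ih =>
    simp only [List.foldl_cons, List.map_cons, List.zipWith_cons_cons, List.getLastD_cons]
    rw [ih]
    simp

-- B's recursion, characterised in the same vocabulary
theorem cbdGo_spec (L : Int) (l : List (List (String × Int))) (p : Int) :
    cbdGo L l p
      = (l.map (fun i => pvLookup i "end"),
         List.zipWith (fun s e => s - e) (l.map (fun i => pvLookup i "start"))
             (p :: l.map (fun i => pvLookup i "end"))
           ++ [L - (l.map (fun i => pvLookup i "end")).getLastD p]) := by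
  induction l generalizing p with
  | nil => simp [cbdGo]
  | cons i t ih =>
    simp only [cbdGo, ih, List.map_cons, List.zipWith_cons_cons, List.getLastD_cons,
      List.cons_append]

-- ===== VERDICT (by name: the statement is the Claim_ definition above) =====
theorem calculate_block_data_spec : Claim_equal_calculate_block_data := by
  intro seq introns _ _
  unfold Spec_calculate_block_data calculate_block_data calculate_block_data_alt
  simp only [cbd_fold_spec, cbdGo_spec, List.nil_append, List.singleton_append]
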